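-- pv_equiv track=rewrite | github.com/Felix2180/Sheep-wars-bot-api | discord_bot.py | _parse_raw_pattern
-- ===== SOURCE A (Python) =====
-- def _parse_raw_pattern(raw: str) -> list:
--     """Parse a raw pattern into list of (code, text) pieces."""
--     parts = []
--     cur_code = None
--     buf = ''
--     i = 0
--     while i < len(raw):
--         ch = raw[i]
--         if ch == '&' and i + 1 < len(raw):
--             if buf:
--                 parts.append((cur_code or 'f', buf))
--                 buf = ''
--             cur_code = raw[i+1].lower()
--             i += 2
--             continue
--         else:
--             buf += ch
--             i += 1
--     if buf:
--         parts.append((cur_code or 'f', buf))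
--     return parts
-- ===== SOURCE B (Python) =====
-- def _parse_raw_pattern(raw: str) -> list:
--     """Split-on-delimiter decomposition: cut the string at every '&' in one
--     library call, then walk the segment list; each non-empty segment donates
--     its first char as the code and the rest as text, an empty segment means
--     '&&' (code '&', the following segment is plain text), and an empty LAST
--     segment means a trailing literal '&'."""
--     segs = raw.split('&')
--     pieces = []
--     code = None
--     buf = segs[0]
--     j = 1
--     n = len(segs)
--     while j < n:
--         seg = segs[j]
--         if seg == '' and j == n - 1:
--             buf += '&'          # lone trailing '&' is literal text
--             j += 1
--         elif seg == '':
--             if buf: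
--                 pieces.append((code or 'f', buf))
--             code = '&'          # '&&': the code is '&' itself
--             buf = segs[j + 1]   # the next segment is plain text (its '&' was consumed)
--             j += 2
--         else:
--             if buf:
--                 pieces.append((code or 'f', buf))
--             code = seg[0].lower()
--             buf = seg[1:]
--             j += 1
--     if buf:
--         pieces.append((code or 'f', buf))
--     return pieces
-- ===== Notes on version B (the rewrite author's own statement) =====
-- stated objective: faster
-- what changed: Replaces A's character-by-character index scan (which grows buf one char at a time) with a delimiter-split decomposition: raw.split('&') cuts the string once, then a loop over the SEGMENT list emits pieces (a non-empty segment donates code=first char, text=rest; an empty segment encodes '&&'; an empty last segment is a literal trailing '&'), so text slices come whole from split and no per-character buffering or lookahead remains.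
import Mathlib
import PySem

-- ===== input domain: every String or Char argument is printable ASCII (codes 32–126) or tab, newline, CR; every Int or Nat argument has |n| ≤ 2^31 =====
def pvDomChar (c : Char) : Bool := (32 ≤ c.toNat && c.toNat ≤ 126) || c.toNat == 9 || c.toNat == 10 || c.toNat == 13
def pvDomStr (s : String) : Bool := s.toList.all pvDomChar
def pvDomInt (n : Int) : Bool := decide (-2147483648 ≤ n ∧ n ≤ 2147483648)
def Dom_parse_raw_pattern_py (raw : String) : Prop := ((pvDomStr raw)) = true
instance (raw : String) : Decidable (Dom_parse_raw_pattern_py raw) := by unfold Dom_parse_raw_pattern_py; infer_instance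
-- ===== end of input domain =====

-- B replaces A's per-character index scan (quadratic buf concatenation) by one split on '&' plus a segment-level loop (objective: faster, measured).

-- ===== PORT A =====
-- A's while-loop over index i, as structural recursion over the remaining characters
-- (cur = cur_code, buf, parts are the loop state; the final 'if buf' flush is the [] case).
def pvA_loop : List Char → Option (List Char) → List Char → List (List Char × List Char) → List (List Char × List Char)
  | [], cur, buf, parts => if buf = [] then parts else parts ++ [(cur.getD ['f'], buf)]
  | c :: rest, cur, buf, parts =>
    if c = '&' ∧ rest ≠ [] then
      match rest with
      | d :: rest' =>
          pvA_loop rest' (some (PySem.Chars.lower [d])) []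
            (if buf = [] then parts else parts ++ [(cur.getD ['f'], buf)])
      | [] => parts  -- unreachable: guarded by rest ≠ []
    else
      pvA_loop rest cur (buf ++ [c]) parts

def parse_raw_pattern_py (raw : String) : List (String × String) :=
  (pvA_loop raw.toList none [] []).map (fun p => (String.ofList p.1, String.ofList p.2))

-- ===== PORT B =====
-- raw.split('&'): Python's str.split with an explicit separator (keeps empty segments), hand-ported exactly.
def pvSplitAmp : List Char → List (List Char)
  | [] => [[]]
  | c :: rest =>
    if c = '&' then [] :: pvSplitAmp rest
    else match pvSplitAmp rest with
      | [] => [[c]]  -- unreachable: pvSplitAmp is never []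
      | h :: t => (c :: h) :: t

-- B's while-loop over the remaining segments segs[j:], state (buf, code, pieces).
def pvB_loop : List Char → Option (List Char) → List (List Char) → List (List Char × List Char) → List (List Char × List Char)
  | buf, cur, [], parts => if buf = [] then parts else parts ++ [(cur.getD ['f'], buf)]
  | buf, cur, [[]], parts => pvB_loop (buf ++ ['&']) cur [] parts   -- empty LAST segment: literal trailing '&'
  | buf, cur, [] :: s :: rest, parts =>                             -- '&&': code '&', next segment is plain text
      pvB_loop s (some ['&']) rest (if buf = [] then parts else parts ++ [(cur.getD ['f'], buf)])
  | buf, cur, (c :: t) :: rest, parts =>                            -- seg[0] is the code, seg[1:] the text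
      pvB_loop t (some (PySem.Chars.lower [c])) rest (if buf = [] then parts else parts ++ [(cur.getD ['f'], buf)])

def parse_raw_pattern_py_alt (raw : String) : List (String × String) :=
  match pvSplitAmp raw.toList with
  | [] => []  -- unreachable: pvSplitAmp is never []
  | s0 :: rest =>
      (pvB_loop s0 none rest []).map (fun p => (String.ofList p.1, String.ofList p.2))

-- ===== PRECONDITION & SPEC =====
def Spec_parse_raw_pattern_py (raw : String) (out : List (String × String)) : Prop := out = parse_raw_pattern_py_alt raw
instance (raw : String) (out : List (String × String)) : Decidable (Spec_parse_raw_pattern_py raw out) := by unfold Spec_parse_raw_pattern_py; infer_instance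

-- ===== CLAIM =====
def Claim_equal_parse_raw_pattern_py : Prop := ∀ (raw : String), Dom_parse_raw_pattern_py raw → Spec_parse_raw_pattern_py raw (parse_raw_pattern_py raw)

-- ===== LEMMAS AND PROOFS =====

theorem pvSplitAmp_cons (cs : List Char) :
    pvSplitAmp cs = (pvSplitAmp cs).headI :: (pvSplitAmp cs).tail := by
  match cs with
  | [] => rfl
  | c :: rest =>
      simp only [pvSplitAmp]
      split
      · rfl
      · split <;> rfl

-- B's segment loop, started with the head segment appended to the buffer, computes A's scan.
theorem pvB_eq_pvA : ∀ (cs : List Char) (cur : Option (List Char)) (buf : List Char)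
    (parts : List (List Char × List Char)),
    pvB_loop (buf ++ (pvSplitAmp cs).headI) cur (pvSplitAmp cs).tail parts
      = pvA_loop cs cur buf parts := by
  intro cs cur buf parts
  induction cs, cur, buf, parts using pvA_loop.induct with
  | case1 cur parts =>
      simp [pvSplitAmp, pvA_loop, pvB_loop]
  | case2 cur buf parts hbuf =>
      simp [pvSplitAmp, pvA_loop, pvB_loop]
  | case3 c cur buf parts d rest' h ih =>
      have hc : c = '&' := h.1
      subst hc
      have hA : pvA_loop ('&' :: d :: rest') cur buf parts
          = pvA_loop rest' (some (PySem.Chars.lower [d])) []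
              (if buf = [] then parts else parts ++ [(cur.getD ['f'], buf)]) := by
        rw [pvA_loop]; simp
      rw [hA, ← ih]
      by_cases hd : d = '&'
      · subst hd
        have hs : pvSplitAmp ('&' :: '&' :: rest') = [] :: [] :: pvSplitAmp rest' := by
          rw [pvSplitAmp, if_pos rfl, pvSplitAmp, if_pos rfl]
        have hlow : PySem.Chars.lower ['&'] = ['&'] := by decide
        rw [hs, pvSplitAmp_cons rest']
        simp [pvB_loop, hlow]
      · have hs : pvSplitAmp ('&' :: d :: rest')
            = [] :: (d :: (pvSplitAmp rest').headI) :: (pvSplitAmp rest').tail := by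
          rw [pvSplitAmp, if_pos rfl]
          conv_lhs => rw [pvSplitAmp]
          rw [if_neg hd]
          conv_lhs => rw [pvSplitAmp_cons rest']
        rw [hs]
        simp [pvB_loop]
  | case4 c cur buf parts h => exact absurd rfl h.2
  | case5 c rest cur buf parts h ih =>
      have hA : pvA_loop (c :: rest) cur buf parts = pvA_loop rest cur (buf ++ [c]) parts := by
        rw [pvA_loop.eq_def]
        simp only [if_neg h]
      rw [hA, ← ih]
      by_cases hc : c = '&'
      · subst hc
        have hrest : rest = [] := by
          by_contra hr
          exact h ⟨rfl, hr⟩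
        subst hrest
        simp [pvSplitAmp, pvB_loop]
      · have hs : pvSplitAmp (c :: rest)
            = (c :: (pvSplitAmp rest).headI) :: (pvSplitAmp rest).tail := by
          conv_lhs => rw [pvSplitAmp]
          rw [if_neg hc]
          conv_lhs => rw [pvSplitAmp_cons rest]
        rw [hs]
        simp

-- ===== VERDICT =====
theorem parse_raw_pattern_py_spec : Claim_equal_parse_raw_pattern_py := by
  intro raw _
  unfold Spec_parse_raw_pattern_py parse_raw_pattern_py parse_raw_pattern_py_alt
  rw [pvSplitAmp_cons raw.toList]
  rw [← pvB_eq_pvA raw.toList none [] []]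
  simp
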